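-- pv_equiv track=rewrite | github.com/duythong244/Baitap04 | 5.15.py | process_test_case
-- ===== SOURCE A (Python) =====
-- def next_greater_element(arr, n):
--     nge = [-1] * n
--     stack = []
--
--     for i in range(n-1, -1, -1):
--         while stack and arr[stack[-1]] <= arr[i]:
--             stack.pop()
--         if stack:
--             nge[i] = arr[stack[-1]]
--         stack.append(i)
--
--     return nge
--
-- def next_smaller_element(arr, n):
--     nse = [-1] * n
--     stack = []
--
--     for i in range(n-1, -1, -1):
--         while stack and arr[stack[-1]] >= arr[i]:
--             stack.pop()
--         if stack:
--             nse[i] = arr[stack[-1]]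
--         stack.append(i)
--
--     return nse
--
-- def process_test_case(n, arr):
--     # Find Next Greater Element
--     nge = next_greater_element(arr, n)
--
--     # Find Next Smaller Element
--     nse = next_smaller_element(arr, n)
--
--     # Result array
--     result = []
--
--     # For each element, find the Next Greater Element and its corresponding Next Smaller Element
--     for i in range(n):
--         if nge[i] == -1:
--             result.append(-1)
--         else:
--             next_smaller = nse[arr.index(nge[i])] if nge[i] != -1 else -1
--             result.append(next_smaller)
--
--     return result
-- ===== SOURCE B (Python) =====
-- def next_greater_element(arr, n):
--     nge = []
--     for i in range(n):
--         val = -1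
--         for j in range(i + 1, n):
--             if arr[j] > arr[i]:
--                 val = arr[j]
--                 break
--         nge.append(val)
--     return nge
--
-- def next_smaller_element(arr, n):
--     nse = []
--     for i in range(n):
--         val = -1
--         for j in range(i + 1, n):
--             if arr[j] < arr[i]:
--                 val = arr[j]
--                 break
--         nse.append(val)
--     return nse
--
-- def process_test_case(n, arr):
--     nge = next_greater_element(arr, n)
--     nse = next_smaller_element(arr, n)
--     result = []
--     for i in range(n):
--         if nge[i] == -1:
--             result.append(-1)
--         else:
--             result.append(nse[arr.index(nge[i])])
--     return result
-- ===== Notes on version B (the rewrite author's own statement) =====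
-- stated objective: simpler
-- what changed: The two monotonic-stack helpers are replaced by direct brute-force forward scans (for each i, scan j>i for the first strictly greater/smaller value); the combining loop with its arr.index first-occurrence lookup is unchanged.
import Mathlib
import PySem

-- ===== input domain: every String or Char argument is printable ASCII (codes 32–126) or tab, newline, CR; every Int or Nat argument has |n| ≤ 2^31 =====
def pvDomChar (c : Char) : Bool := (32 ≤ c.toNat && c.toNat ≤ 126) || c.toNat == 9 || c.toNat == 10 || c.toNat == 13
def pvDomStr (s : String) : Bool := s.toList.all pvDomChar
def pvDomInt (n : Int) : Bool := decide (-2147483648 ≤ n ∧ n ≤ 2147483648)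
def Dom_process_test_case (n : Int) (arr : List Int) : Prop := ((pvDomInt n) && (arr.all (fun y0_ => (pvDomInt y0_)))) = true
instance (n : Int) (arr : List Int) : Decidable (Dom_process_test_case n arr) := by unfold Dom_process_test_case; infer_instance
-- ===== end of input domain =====

-- B replaces the two monotonic-stack helpers with brute-force forward scans for the first
-- strictly greater / smaller element; the combining loop (including arr.index) is unchanged. Objective: simpler.


-- ===== PORT A =====
-- arr[j]; under Pre_ every index used is in range
def pvElem (arr : List Int) (j : Int) : Int := PySem.List.pyGetD arr j 0

-- the inner `while stack and cmp(arr[stack[-1]], arr[i]): stack.pop()` loop (stack top at head)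
def pvPop (cmp : Int → Int → Bool) (arr : List Int) (x : Int) : List Int → List Int
  | [] => []
  | j :: s => if cmp (pvElem arr j) x then pvPop cmp arr x s else j :: s

-- the body of `for i in range(n-1, -1, -1)`: one iteration, state = (nge, stack)
def pvStep (cmp : Int → Int → Bool) (arr : List Int) (st : List Int × List Int) (i : Int) :
    List Int × List Int :=
  let stack := pvPop cmp arr (pvElem arr i) st.2
  let nge := match stack with
    | j :: _ => PySem.List.pySetD st.1 i (pvElem arr j)
    | [] => st.1
  (nge, i :: stack)

-- the shared body of next_greater_element (cmp = ≤) and next_smaller_element (cmp = ≥)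
def pvStackScan (cmp : Int → Int → Bool) (arr : List Int) (n : Int) : List Int :=
  ((PySem.List.pyRange (n - 1) (-1) (-1)).foldl (pvStep cmp arr)
    (List.replicate n.toNat (-1), [])).1

def next_greater_element (arr : List Int) (n : Int) : List Int :=
  pvStackScan (fun a b => decide (a ≤ b)) arr n

def next_smaller_element (arr : List Int) (n : Int) : List Int :=
  pvStackScan (fun a b => decide (a ≥ b)) arr n

def process_test_case (n : Int) (arr : List Int) : List Int :=
  let nge := next_greater_element arr n
  let nse := next_smaller_element arr n
  (PySem.List.pyRange 0 n 1).map (fun i =>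
    let g := pvElem nge i
    if g = -1 then -1
    else if g ≠ -1 then pvElem nse (((PySem.List.index? arr g).getD 0 : Nat) : Int) else -1)

-- ===== PORT B =====
-- the inner `for j in range(j0, n): if good(arr[j], x): val = arr[j]; break` scan
def pvScan (good : Int → Int → Bool) (arr : List Int) (x : Int) (j n : Int) : Int :=
  if h : j < n then
    if good (pvElem arr j) x then pvElem arr j
    else pvScan good arr x (j + 1) n
  else -1
termination_by (n - j).toNat
decreasing_by omega

def next_greater_element_alt (arr : List Int) (n : Int) : List Int :=
  (PySem.List.pyRange 0 n 1).map (fun i =>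
    pvScan (fun a b => decide (a > b)) arr (pvElem arr i) (i + 1) n)

def next_smaller_element_alt (arr : List Int) (n : Int) : List Int :=
  (PySem.List.pyRange 0 n 1).map (fun i =>
    pvScan (fun a b => decide (a < b)) arr (pvElem arr i) (i + 1) n)

def process_test_case_alt (n : Int) (arr : List Int) : List Int :=
  let nge := next_greater_element_alt arr n
  let nse := next_smaller_element_alt arr n
  (PySem.List.pyRange 0 n 1).map (fun i =>
    let g := pvElem nge i
    if g = -1 then -1
    else pvElem nse (((PySem.List.index? arr g).getD 0 : Nat) : Int))

-- ===== PRECONDITION & SPEC =====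
-- A raises IndexError exactly when n > len(arr) (arr[n-1] in the first stack loop); nothing else is excluded.
def Pre_process_test_case (n : Int) (arr : List Int) : Prop := n ≤ (arr.length : Int)
instance (n : Int) (arr : List Int) : Decidable (Pre_process_test_case n arr) := by unfold Pre_process_test_case; infer_instance
def pvWitness_process_test_case : Int × List Int := (4, [2, 1, 4, 3])

def Spec_process_test_case (n : Int) (arr : List Int) (out : List Int) : Prop := out = process_test_case_alt n arr
instance (n : Int) (arr : List Int) (out : List Int) : Decidable (Spec_process_test_case n arr out) := by unfold Spec_process_test_case; infer_instance

-- ===== CLAIM (what is proved, stated in full; the proofs are below) =====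
def Claim_equal_process_test_case : Prop := ∀ (n : Int) (arr : List Int), Dom_process_test_case n arr → Pre_process_test_case n arr → Spec_process_test_case n arr (process_test_case n arr)

-- ===== LEMMAS AND PROOFS =====

-- A's stack after the countdown loop has processed indices n-1, n-2, …, i
def pvStk (cmp : Int → Int → Bool) (arr : List Int) (n i : Nat) : List Int :=
  if h : i < n then ((i : Int)) :: pvPop cmp arr (pvElem arr (i : Int)) (pvStk cmp arr n (i + 1))
  else []
termination_by n - i

-- the value the stack loop writes into position i
def pvVal (cmp : Int → Int → Bool) (arr : List Int) (n i : Nat) : Int :=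
  match pvPop cmp arr (pvElem arr (i : Int)) (pvStk cmp arr n (i + 1)) with
  | j :: _ => pvElem arr j
  | [] => -1

-- the suffix of A's result list from position i on
def pvTail (cmp : Int → Int → Bool) (arr : List Int) (n i : Nat) : List Int :=
  if h : i < n then pvVal cmp arr n i :: pvTail cmp arr n (i + 1) else []
termination_by n - i

theorem pvSet_mid (m : Nat) (c d v : Int) (T : List Int) :
    (List.replicate m c ++ (d :: T)).set m v = List.replicate m c ++ v :: T := by
  rw [List.set_append_right _ _ (by simp), List.length_replicate]
  simp

-- popping with a weaker bound first does not change the result of popping with a stronger one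
theorem pvPop_pvPop (cmp : Int → Int → Bool) (arr : List Int) (x y : Int)
    (h : ∀ v, cmp v y = true → cmp v x = true) :
    ∀ s : List Int, pvPop cmp arr x (pvPop cmp arr y s) = pvPop cmp arr x s := by
  intro s
  induction s with
  | nil => rfl
  | cons j s ih =>
    by_cases hj : cmp (pvElem arr j) y = true
    · simp [pvPop, hj, h _ hj, ih]
    · simp [pvPop, hj]

-- popping the invariant stack behaves like B's forward scan
theorem pvPop_stk_eq_scan (cmp good : Int → Int → Bool) (arr : List Int)
    (htrans : ∀ v w x, cmp v w = true → cmp w x = true → cmp v x = true)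
    (hgood : ∀ v x, good v x = !cmp v x) (n : Nat) :
    ∀ k i x, n - i ≤ k → (match pvPop cmp arr x (pvStk cmp arr n i) with
            | j :: _ => pvElem arr j
            | [] => -1) = pvScan good arr x (i : Int) (n : Int) := by
  intro k
  induction k with
  | zero =>
    intro i x h
    rw [pvStk, dif_neg (by omega), pvScan, dif_neg (by exact_mod_cast (by omega : ¬ (i:Int) < (n:Int)))]
    rfl
  | succ k ih =>
    intro i x h
    by_cases hin : i < n
    · rw [pvStk, dif_pos hin, pvScan, dif_pos (by exact_mod_cast hin)]
      by_cases hc : cmp (pvElem arr (i : Int)) x = true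
      · rw [show pvPop cmp arr x ((i:Int) :: pvPop cmp arr (pvElem arr (i:Int)) (pvStk cmp arr n (i+1)))
              = pvPop cmp arr x (pvPop cmp arr (pvElem arr (i:Int)) (pvStk cmp arr n (i+1))) by
            simp [pvPop, hc]]
        rw [pvPop_pvPop cmp arr x (pvElem arr (i:Int)) (fun v hv => htrans v _ x hv hc)]
        rw [hgood, hc]
        simp only [Bool.not_true, Bool.false_eq_true, if_false]
        rw [show ((i:Int) + 1) = ((i+1 : Nat) : Int) by push_cast; ring]
        exact ih (i+1) x (by omega)
      · rw [show pvPop cmp arr x ((i:Int) :: pvPop cmp arr (pvElem arr (i:Int)) (pvStk cmp arr n (i+1)))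
              = (i:Int) :: pvPop cmp arr (pvElem arr (i:Int)) (pvStk cmp arr n (i+1)) by
            simp [pvPop, hc]]
        rw [hgood]
        simp [hc]
    · rw [pvStk, dif_neg hin, pvScan, dif_neg (by exact_mod_cast hin)]
      rfl

theorem pvVal_eq_scan (cmp good : Int → Int → Bool) (arr : List Int)
    (htrans : ∀ v w x, cmp v w = true → cmp w x = true → cmp v x = true)
    (hgood : ∀ v x, good v x = !cmp v x) (n i : Nat) :
    pvVal cmp arr n i = pvScan good arr (pvElem arr (i : Int)) ((i : Int) + 1) (n : Int) := by
  rw [pvVal, show ((i:Int) + 1) = ((i+1 : Nat) : Int) by push_cast; ring]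
  exact pvPop_stk_eq_scan cmp good arr htrans hgood n (n - (i+1)) (i+1) _ le_rfl

theorem pvTail_eq_map (cmp good : Int → Int → Bool) (arr : List Int)
    (htrans : ∀ v w x, cmp v w = true → cmp w x = true → cmp v x = true)
    (hgood : ∀ v x, good v x = !cmp v x) (n : Nat) :
    ∀ k m, n - m ≤ k → pvTail cmp arr n m = (PySem.List.pyRange (m : Int) (n : Int) 1).map
      (fun i => pvScan good arr (pvElem arr i) (i + 1) (n : Int)) := by
  intro k
  induction k with
  | zero =>
    intro m h
    rw [pvTail, dif_neg (by omega),
        PySem.List.pyRange_one_eq_nil (by exact_mod_cast (by omega : n ≤ m))]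
    rfl
  | succ k ih =>
    intro m h
    by_cases hmn : m < n
    · rw [pvTail, dif_pos hmn,
          PySem.List.pyRange_one_cons (by exact_mod_cast hmn), List.map_cons,
          pvVal_eq_scan cmp good arr htrans hgood n m,
          show ((m:Int) + 1) = ((m+1 : Nat) : Int) by push_cast; ring,
          ih (m+1) (by omega)]
    · rw [pvTail, dif_neg hmn,
          PySem.List.pyRange_one_eq_nil (by exact_mod_cast (by omega : n ≤ m))]
      rfl

-- loop invariant: after processing indices n-1 … m, the state is (replicate m (-1) ++ pvTail m, pvStk m)
theorem pvFold (cmp : Int → Int → Bool) (arr : List Int) (n : Nat) :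
    ∀ m, m ≤ n →
      ((PySem.List.pyRange ((m : Int) - 1) (-1) (-1)).foldl (pvStep cmp arr)
        (List.replicate m (-1) ++ pvTail cmp arr n m, pvStk cmp arr n m))
      = (pvTail cmp arr n 0, pvStk cmp arr n 0) := by
  intro m
  induction m with
  | zero =>
    intro _
    rw [PySem.List.pyRange_neg_one_eq_nil (by norm_num)]
    simp
  | succ m ih =>
    intro hm
    rw [show ((m + 1 : Nat) : Int) - 1 = (m : Int) by push_cast; ring,
        PySem.List.pyRange_neg_one_cons (by omega),
        List.foldl_cons]
    have hmn : m < n := hm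
    have hstep :
        pvStep cmp arr
          (List.replicate (m+1) (-1) ++ pvTail cmp arr n (m+1), pvStk cmp arr n (m+1)) ((m : Int))
        = (List.replicate m (-1) ++ pvTail cmp arr n m, pvStk cmp arr n m) := by
      have hrep : List.replicate (m+1) (-1 : Int) ++ pvTail cmp arr n (m+1)
          = List.replicate m (-1) ++ ((-1) :: pvTail cmp arr n (m+1)) := by
        rw [List.replicate_succ', List.append_assoc]; rfl
      have htl : pvTail cmp arr n m = pvVal cmp arr n m :: pvTail cmp arr n (m+1) := by
        rw [pvTail, dif_pos hmn]
      have hstk : pvStk cmp arr n m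
          = (m : Int) :: pvPop cmp arr (pvElem arr (m : Int)) (pvStk cmp arr n (m+1)) := by
        rw [pvStk, dif_pos hmn]
      simp only [pvStep]
      cases hps : pvPop cmp arr (pvElem arr (m : Int)) (pvStk cmp arr n (m+1)) with
      | nil =>
        rw [htl, pvVal, hps, hstk, hps]
        simp [hrep]
      | cons j t =>
        simp only [PySem.List.pySetD_natCast]
        rw [hrep, pvSet_mid, htl, pvVal, hps, hstk, hps]
    rw [hstep, ih (by omega)]

theorem pvStackScan_eq (cmp good : Int → Int → Bool) (arr : List Int) (n : Int)
    (htrans : ∀ v w x, cmp v w = true → cmp w x = true → cmp v x = true)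
    (hgood : ∀ v x, good v x = !cmp v x) :
    pvStackScan cmp arr n = (PySem.List.pyRange 0 n 1).map
      (fun i => pvScan good arr (pvElem arr i) (i + 1) n) := by
  by_cases hn : n ≤ 0
  · rw [pvStackScan, PySem.List.pyRange_neg_one_eq_nil (by omega),
        PySem.List.pyRange_one_eq_nil hn]
    simp [Int.toNat_of_nonpos hn]
  · have hN : n = ((n.toNat : Nat) : Int) := by omega
    have h0 : (List.replicate n.toNat (-1 : Int), ([] : List Int))
        = (List.replicate n.toNat (-1) ++ pvTail cmp arr n.toNat n.toNat,
           pvStk cmp arr n.toNat n.toNat) := by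
      rw [pvTail, dif_neg (lt_irrefl n.toNat), pvStk, dif_neg (lt_irrefl n.toNat)]; simp
    rw [pvStackScan, h0, hN, Int.toNat_natCast,
        pvFold cmp arr n.toNat n.toNat le_rfl]
    have := pvTail_eq_map cmp good arr htrans hgood n.toNat n.toNat 0 (by omega)
    simpa using this

-- ===== VERDICT (by name: the statement is the Claim_ definition above) =====
theorem process_test_case_spec : Claim_equal_process_test_case := by
  intro n arr _ _
  unfold Spec_process_test_case process_test_case process_test_case_alt
  unfold next_greater_element next_smaller_element
  rw [pvStackScan_eq (fun a b => decide (a ≤ b)) (fun a b => decide (a > b)) arr n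
        (by intro v w x h1 h2; simp at *; omega)
        (by intro v x; by_cases h : v ≤ x <;> simp [h]; omega),
      pvStackScan_eq (fun a b => decide (a ≥ b)) (fun a b => decide (a < b)) arr n
        (by intro v w x h1 h2; simp at *; omega)
        (by intro v x; by_cases h : v ≥ x <;> simp [h]; omega)]
  unfold next_greater_element_alt next_smaller_element_alt
  apply List.map_congr_left
  intro i _
  by_cases hg : pvElem ((PySem.List.pyRange 0 n 1).map
      (fun i => pvScan (fun a b => decide (a > b)) arr (pvElem arr i) (i + 1) n)) i = -1 <;>
    simp [hg]
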